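-- pv_equiv track=rewrite | github.com/Jejis06/ASD | oioioi/1_off/sol2.py | solution
-- ===== SOURCE A (Python) =====
-- def merge_sort(A, B, cnts, p, r):
--     if r - p <= 1: return
--     q = (p + r) // 2
--     merge_sort(A, B, cnts, p, q)
--     merge_sort(A, B, cnts, q, r)
--
--     i = p; j = q; k = p
--     while i < q and j < r:
--         if A[i][0] < A[j][0]:
--             B[k] = A[i]
--             i += 1
--         else:
--             cnts[A[j][1]] += (i - p)
--             B[k] = A[j]
--             j += 1
--         k += 1
--
--
--     if i < q:
--         B[k:r] = A[i:q]
--     else: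
--         B[k:r] = A[j:r]
--         added = q - p
--         for x in range(j, r):
--             cnts[A[x][1]] += added
--
--
--     A[p:r] = B[p:r]
--
-- def solution(words: list[str]):
--     n = len(words)
--     if n == 0: return 0
--     ids = sorted(set(words))
--     ind_map = dict(zip(ids, range(len(ids))))
--
--     A = [(ind_map[w], i) for i, w in enumerate(words)]
--     B = [0] * n
--     counts = [0] * n
--
--     merge_sort(A, B, counts, 0, n)
--     return max(counts)
-- ===== SOURCE B (Python) =====
-- def solution(words: list[str]):
--     # One left-to-right pass: for each word, count the strictly smaller
--     # words before it; return the running maximum (0 for empty input).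
--     best = 0
--     seen = []
--     for w in words:
--         best = max(best, sum(1 for x in seen if x < w))
--         seen.append(w)
--     return best
-- ===== Notes on version B (the rewrite author's own statement) =====
-- stated objective: simpler
-- what changed: Replaced the rank-compression plus in-place merge-sort inversion counting (scratch array, per-element count array, final max) by a direct single left-to-right pass that counts, for each word, the strictly smaller earlier words and keeps a running maximum.
import Mathlib
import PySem

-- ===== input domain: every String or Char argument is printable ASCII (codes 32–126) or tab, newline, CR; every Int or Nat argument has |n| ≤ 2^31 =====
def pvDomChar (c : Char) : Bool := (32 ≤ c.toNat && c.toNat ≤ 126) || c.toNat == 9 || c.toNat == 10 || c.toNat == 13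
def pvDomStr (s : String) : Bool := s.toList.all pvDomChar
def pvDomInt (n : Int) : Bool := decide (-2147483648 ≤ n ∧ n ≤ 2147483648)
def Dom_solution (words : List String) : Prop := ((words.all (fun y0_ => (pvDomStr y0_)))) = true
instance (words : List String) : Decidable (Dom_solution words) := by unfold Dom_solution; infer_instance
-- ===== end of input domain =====

-- B replaces A's rank-compression + in-place merge-sort inversion counting by one quadratic
-- left-to-right pass (count strictly smaller earlier words, running maximum): simpler, not faster.

-- ===== PORT A =====
-- merge_sort(A, B, cnts, p, r): the in-place recursion on index range [p, r) is rendered as a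
-- recursion on the sublist A[p:r]; the scratch array B is the merge output, cnts is threaded.
-- The merge 'while' loop: `t` is Python's `i - p` (elements consumed from the left half);
-- when the left half is exhausted first, t = q - p is Python's `added`.
def mergeCnt : List (Int × Nat) → List (Int × Nat) → Nat → List Int → List (Int × Nat) × List Int
  | [], ys, t, c => (ys, ys.foldl (fun c' y => c'.set y.2 (c'.getD y.2 0 + t)) c)
  | x :: xs, [], _, c => (x :: xs, c)
  | x :: xs, y :: ys, t, c =>
      if x.1 < y.1 then
        let r := mergeCnt xs (y :: ys) (t + 1) c
        (x :: r.1, r.2)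
      else
        let r := mergeCnt (x :: xs) ys t (c.set y.2 (c.getD y.2 0 + t))
        (y :: r.1, r.2)
  termination_by xs ys => xs.length + ys.length

def msortCnt (l : List (Int × Nat)) (c : List Int) : List (Int × Nat) × List Int :=
  if l.length ≤ 1 then (l, c)
  else
    let q := l.length / 2
    let r1 := msortCnt (l.take q) c
    let r2 := msortCnt (l.drop q) r1.2
    mergeCnt r1.1 r2.1 0 r2.2
  termination_by l.length
  decreasing_by
  · simp only [List.length_take]; omega
  · simp only [List.length_drop]; omega

-- ids = sorted(set(words))
def aIds (words : List String) : List String :=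
  PySem.List.sorted (PySem.Set.ofList words) (fun x => x) false

-- ind_map = dict(zip(ids, range(len(ids))))
def aMap (words : List String) : PySem.Dict String Int :=
  PySem.Dict.ofList ((aIds words).zip (PySem.List.pyRange 0 (PySem.List.len (aIds words)) 1))

-- A = [(ind_map[w], i) for i, w in enumerate(words)]  (ind_map[w] always hits; i is a list index)
def aArr (words : List String) : List (Int × Nat) :=
  (PySem.List.enumerate words 0).map (fun p => ((aMap words).getD p.2 0, p.1.toNat))

def solution (words : List String) : Int :=
  if words.length = 0 then 0
  else
    ((PySem.List.max? (msortCnt (aArr words) (List.replicate words.length 0)).2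
        (fun x => x)).getD 0)   -- max(counts); counts is nonempty here

-- ===== PORT B =====
def solution_alt (words : List String) : Int :=
  (words.foldl
    (fun (st : Int × List String) w =>
      (max st.1 ((st.2.countP (fun x => decide (x < w)) : Int)), st.2 ++ [w]))
    (0, [])).1

-- ===== PRECONDITION & SPEC =====
def Spec_solution (words : List String) (out : Int) : Prop := out = solution_alt words
instance (words : List String) (out : Int) : Decidable (Spec_solution words out) := by unfold Spec_solution; infer_instance

-- ===== CLAIM (what is proved, stated in full; the proofs are below) =====
def Claim_equal_solution : Prop := ∀ (words : List String), Dom_solution words → Spec_solution words (solution words)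

-- ===== LEMMAS AND PROOFS =====

-- number of elements of L with rank strictly below v
def smallerCnt (L : List (Int × Nat)) (v : Int) : Nat := L.countP (fun x => decide (x.1 < v))

-- cross-half inversion contribution to index j: for each y in R with index j, elements of L below it
def cross (L : List (Int × Nat)) : List (Int × Nat) → Nat → Int
  | [], _ => 0
  | y :: rest, j => (if y.2 = j then (smallerCnt L y.1 : Int) else 0) + cross L rest j

-- total inversion contribution to index j of a list, with explicit already-seen prefix
def contribA (pre : List (Int × Nat)) : List (Int × Nat) → Nat → Int
  | [], _ => 0
  | y :: rest, j => (if y.2 = j then (smallerCnt pre y.1 : Int) else 0) + contribA (pre ++ [y]) rest j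

def contrib (l : List (Int × Nat)) (j : Nat) : Int := contribA [] l j

def countIdx (v : List (Int × Nat)) (j : Nat) : Nat := v.countP (fun y => decide (y.2 = j))

def sortedLE (l : List (Int × Nat)) : Prop := l.Pairwise (fun a b => a.1 ≤ b.1)

lemma cross_append_left (a b v : List (Int × Nat)) (j : Nat) :
    cross (a ++ b) v j = cross a v j + cross b v j := by
  induction v with
  | nil => simp [cross]
  | cons y rest ih =>
      simp only [cross, ih, smallerCnt, List.countP_append]
      split_ifs <;> push_cast <;> ring

lemma cross_eq_sum_map (L v : List (Int × Nat)) (j : Nat) :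
    cross L v j = (v.map (fun y => if y.2 = j then (smallerCnt L y.1 : Int) else 0)).sum := by
  induction v with
  | nil => simp [cross]
  | cons y rest ih => simp [cross, ih]

lemma cross_perm_left {a b : List (Int × Nat)} (h : a.Perm b) (v : List (Int × Nat)) (j : Nat) :
    cross a v j = cross b v j := by
  induction v with
  | nil => simp [cross]
  | cons y rest ih => simp [cross, ih, smallerCnt, h.countP_eq]

lemma cross_perm_right (L : List (Int × Nat)) {u v : List (Int × Nat)} (h : u.Perm v) (j : Nat) :
    cross L u j = cross L v j := by
  rw [cross_eq_sum_map, cross_eq_sum_map]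
  exact (h.map _).sum_eq

lemma cross_eq_zero_of_no_idx (L : List (Int × Nat)) {v : List (Int × Nat)} {j : Nat}
    (h : ∀ y ∈ v, y.2 ≠ j) : cross L v j = 0 := by
  induction v with
  | nil => simp [cross]
  | cons y rest ih =>
      simp only [cross, ih (fun z hz => h z (by simp [hz]))]
      simp [h y (by simp)]

lemma contribA_eq (pre v : List (Int × Nat)) (j : Nat) :
    contribA pre v j = contribA [] v j + cross pre v j := by
  induction v generalizing pre with
  | nil => simp [contribA, cross]
  | cons y rest ih =>
      simp only [contribA, cross]
      rw [ih (pre ++ [y]), ih ([] ++ [y]), cross_append_left]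
      simp only [smallerCnt, List.countP_nil, List.nil_append]
      split_ifs <;> push_cast <;> ring

lemma contribA_append (pre u v : List (Int × Nat)) (j : Nat) :
    contribA pre (u ++ v) j = contribA pre u j + contribA (pre ++ u) v j := by
  induction u generalizing pre with
  | nil => simp [contribA]
  | cons y rest ih =>
      simp only [List.cons_append, contribA, ih (pre ++ [y]), List.append_assoc,
        List.singleton_append, List.nil_append]
      ring

lemma contrib_append (u v : List (Int × Nat)) (j : Nat) :
    contrib (u ++ v) j = contrib u j + contrib v j + cross u v j := by
  simp only [contrib, contribA_append, List.nil_append]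
  rw [contribA_eq u v j]
  ring

lemma contrib_short {l : List (Int × Nat)} (h : l.length ≤ 1) (j : Nat) : contrib l j = 0 := by
  match l, h with
  | [], _ => simp [contrib, contribA]
  | [e], _ => simp [contrib, contribA, smallerCnt]

lemma contribA_eq_zero_of_no_idx (pre : List (Int × Nat)) {v : List (Int × Nat)} {j : Nat}
    (h : ∀ y ∈ v, y.2 ≠ j) : contribA pre v j = 0 := by
  induction v generalizing pre with
  | nil => simp [contribA]
  | cons y rest ih =>
      simp only [contribA, ih (pre ++ [y]) (fun z hz => h z (by simp [hz]))]
      simp [h y (by simp)]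

lemma smallerCnt_eq_zero {L : List (Int × Nat)} {v : Int} (h : ∀ z ∈ L, ¬ z.1 < v) :
    smallerCnt L v = 0 := by
  simp only [smallerCnt, List.countP_eq_zero]
  intro a ha; simpa using h a ha

lemma cross_cons_left_of_lt {x : Int × Nat} {xs v : List (Int × Nat)} {j : Nat}
    (h : ∀ y ∈ v, x.1 < y.1) :
    cross (x :: xs) v j = cross xs v j + countIdx v j := by
  induction v with
  | nil => simp [cross, countIdx]
  | cons y rest ih =>
      simp only [cross, countIdx, List.countP_cons,
        ih (fun z hz => h z (by simp [hz])), smallerCnt, List.countP_cons]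
      have hx : x.1 < y.1 := h y (by simp)
      by_cases hyj : y.2 = j
      · simp [hyj, hx]; push_cast; ring
      · simp [hyj]

-- helper: getD after set
lemma getD_set (xs : List Int) (k : Nat) (v : Int) (j : Nat) (hk : k < xs.length) :
    (xs.set k v).getD j 0 = if j = k then v else xs.getD j 0 := by
  simp only [List.getD, List.getElem?_set]
  by_cases h : k = j
  · subst h; simp [hk]
  · simp [h, show ¬ j = k from fun hh => h hh.symm]

lemma length_foldl_set (ys : List (Int × Nat)) (t : Nat) (c : List Int) :
    (ys.foldl (fun c' y => c'.set y.2 (c'.getD y.2 0 + t)) c).length = c.length := by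
  induction ys generalizing c with
  | nil => rfl
  | cons y rest ih => rw [List.foldl_cons, ih]; simp

lemma getD_foldl_set (ys : List (Int × Nat)) (t : Nat) (c : List Int) (j : Nat)
    (hb : ∀ y ∈ ys, y.2 < c.length) :
    (ys.foldl (fun c' y => c'.set y.2 (c'.getD y.2 0 + t)) c).getD j 0
      = c.getD j 0 + (t : Int) * countIdx ys j := by
  induction ys generalizing c with
  | nil => simp [countIdx]
  | cons y rest ih =>
      have hy : y.2 < c.length := hb y (by simp)
      simp only [List.foldl_cons]
      rw [ih _ (fun z hz => by simpa using hb z (by simp [hz]))]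
      rw [getD_set _ _ _ _ hy]
      simp only [countIdx, List.countP_cons]
      by_cases h : y.2 = j
      · subst h; simp; push_cast; ring
      · simp [h, show ¬ j = y.2 from fun hh => h hh.symm]

lemma cross_nil_left (v : List (Int × Nat)) (j : Nat) : cross [] v j = 0 := by
  induction v with
  | nil => rfl
  | cons y rest ih => simp [cross, ih, smallerCnt]

lemma mergeCnt_perm (xs ys : List (Int × Nat)) (t : Nat) (c : List Int) :
    (mergeCnt xs ys t c).1.Perm (xs ++ ys) := by
  induction xs, ys, t, c using mergeCnt.induct with
  | case1 ys t c => simp [mergeCnt]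
  | case2 x xs t c => simp [mergeCnt]
  | case3 x xs y ys t c h ih =>
      simp only [mergeCnt, if_pos h, List.cons_append]
      exact ih.cons x
  | case4 x xs y ys t c h ih =>
      simp only [mergeCnt, if_neg h]
      exact (ih.cons y).trans List.perm_middle.symm

lemma mergeCnt_sorted (xs ys : List (Int × Nat)) (t : Nat) (c : List Int) :
    sortedLE xs → sortedLE ys → sortedLE (mergeCnt xs ys t c).1 := by
  induction xs, ys, t, c using mergeCnt.induct with
  | case1 ys t c => intro _ hy; simpa [mergeCnt] using hy
  | case2 x xs t c => intro hx _; simpa [mergeCnt] using hx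
  | case3 x xs y ys t c h ih =>
      intro hx hy
      simp only [mergeCnt, if_pos h]
      rw [sortedLE, List.pairwise_cons]
      refine ⟨?_, ih (List.pairwise_cons.mp hx).2 hy⟩
      intro z hz
      have hz' : z ∈ xs ++ y :: ys := (mergeCnt_perm _ _ _ _).mem_iff.mp hz
      rcases List.mem_append.mp hz' with hz1 | hz2
      · exact (List.pairwise_cons.mp hx).1 z hz1
      · rcases List.mem_cons.mp hz2 with rfl | hz3
        · exact le_of_lt h
        · exact le_of_lt (lt_of_lt_of_le h ((List.pairwise_cons.mp hy).1 z hz3))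
  | case4 x xs y ys t c h ih =>
      intro hx hy
      simp only [mergeCnt, if_neg h]
      rw [sortedLE, List.pairwise_cons]
      refine ⟨?_, ih hx (List.pairwise_cons.mp hy).2⟩
      intro z hz
      have hz' : z ∈ (x :: xs) ++ ys := (mergeCnt_perm _ _ _ _).mem_iff.mp hz
      have hyx : y.1 ≤ x.1 := le_of_not_gt h
      rcases List.mem_append.mp hz' with hz1 | hz2
      · rcases List.mem_cons.mp hz1 with rfl | hz3
        · exact hyx
        · exact le_trans hyx ((List.pairwise_cons.mp hx).1 z hz3)
      · exact (List.pairwise_cons.mp hy).1 z hz2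

lemma mergeCnt_len (xs ys : List (Int × Nat)) (t : Nat) (c : List Int) :
    (mergeCnt xs ys t c).2.length = c.length := by
  induction xs, ys, t, c using mergeCnt.induct with
  | case1 ys t c => simpa [mergeCnt] using length_foldl_set ys t c
  | case2 x xs t c => simp [mergeCnt]
  | case3 x xs y ys t c h ih => simpa [mergeCnt, if_pos h] using ih
  | case4 x xs y ys t c h ih => simp only [mergeCnt, if_neg h]; rw [ih]; simp

lemma mergeCnt_cnt (xs ys : List (Int × Nat)) (t : Nat) (c : List Int) (j : Nat) :
    sortedLE xs → sortedLE ys → (∀ y ∈ ys, y.2 < c.length) →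
    (mergeCnt xs ys t c).2.getD j 0
      = c.getD j 0 + cross xs ys j + (t : Int) * countIdx ys j := by
  induction xs, ys, t, c using mergeCnt.induct with
  | case1 ys t c =>
      intro _ _ hb
      simp only [mergeCnt]
      rw [getD_foldl_set ys t c j hb, cross_nil_left]
      ring
  | case2 x xs t c => intro _ _ _; simp [mergeCnt, cross, countIdx]
  | case3 x xs y ys t c h ih =>
      intro hx hy hb
      have hall : ∀ z ∈ y :: ys, x.1 < z.1 := by
        intro z hz
        rcases List.mem_cons.mp hz with rfl | hz2
        · exact h
        · exact lt_of_lt_of_le h ((List.pairwise_cons.mp hy).1 z hz2)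
      simp only [mergeCnt, if_pos h]
      rw [ih (List.pairwise_cons.mp hx).2 hy hb, cross_cons_left_of_lt hall]

      push_cast
      ring
  | case4 x xs y ys t c h ih =>
      intro hx hy hb
      have hyc : y.2 < c.length := hb y (by simp)
      have hz : smallerCnt (x :: xs) y.1 = 0 := by
        apply smallerCnt_eq_zero
        intro z hzz
        rcases List.mem_cons.mp hzz with rfl | hz3
        · exact h
        · exact fun hlt => h (lt_of_le_of_lt ((List.pairwise_cons.mp hx).1 z hz3) hlt)
      simp only [mergeCnt, if_neg h]
      rw [ih hx (List.pairwise_cons.mp hy).2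
        (fun z hzz => by simpa using hb z (by simp [hzz]))]
      rw [getD_set _ _ _ _ hyc]
      simp only [cross, countIdx, List.countP_cons, hz]
      by_cases hj : y.2 = j
      · subst hj; simp; push_cast; ring
      · simp [hj, show ¬ j = y.2 from fun hh => hj hh.symm]

lemma msortCnt_spec (l : List (Int × Nat)) (c : List Int) :
    (∀ e ∈ l, e.2 < c.length) →
    (msortCnt l c).1.Perm l ∧ sortedLE (msortCnt l c).1 ∧
      (msortCnt l c).2.length = c.length ∧
      ∀ j, (msortCnt l c).2.getD j 0 = c.getD j 0 + contrib l j := by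
  induction l, c using msortCnt.induct with
  | case1 l c hshort =>
      intro _
      rw [msortCnt, if_pos hshort]
      refine ⟨List.Perm.refl l, ?_, rfl, fun j => by rw [contrib_short hshort]; ring⟩
      match l, hshort with
      | [], _ => exact List.Pairwise.nil
      | [e], _ => exact List.pairwise_singleton _ e
  | case2 l c hshort qv r1v ih1 ih1' ih2 =>
      intro hb

      set q := l.length / 2 with hq
      obtain ⟨hp1, hs1, hl1, hc1⟩ := ih1 (fun e he => hb e (List.mem_of_mem_take he))
      obtain ⟨hp2, hs2, hl2, hc2⟩ := ih2 (by
        rw [hl1]; exact fun e he => hb e (List.mem_of_mem_drop he))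
      rw [msortCnt, if_neg hshort]
      have hbm : ∀ y ∈ (msortCnt (l.drop q) (msortCnt (l.take q) c).2).1,
          y.2 < (msortCnt (l.drop q) (msortCnt (l.take q) c).2).2.length := by
        intro y hy
        rw [hl2, hl1]
        exact hb y (List.mem_of_mem_drop (hp2.mem_iff.mp hy))
      refine ⟨?_, ?_, ?_, ?_⟩
      · exact (mergeCnt_perm _ _ _ _).trans
          (((hp1.append hp2).trans (by rw [List.take_append_drop])))
      · exact mergeCnt_sorted _ _ _ _ hs1 hs2
      · rw [mergeCnt_len, hl2, hl1]
      · intro j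
        rw [mergeCnt_cnt _ _ _ _ _ hs1 hs2 hbm, hc2 j, hc1 j]
        have hcr : cross (msortCnt (l.take q) c).1 (msortCnt (l.drop q) (msortCnt (l.take q) c).2).1 j
            = cross (l.take q) (l.drop q) j := by
          rw [cross_perm_left hp1, cross_perm_right _ hp2]
        rw [hcr]
        have := contrib_append (l.take q) (l.drop q) j
        rw [List.take_append_drop] at this
        rw [this]
        push_cast
        ring

-- rank of a word = its position in ids
def rnk (words : List String) (w : String) : Int := (aMap words).getD w 0

-- per-position count of strictly smaller earlier words
def cntI (words : List String) (j : Nat) : Int :=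
  ((words.take j).countP (fun x => decide (x < words.getD j "")) : Int)

-- the list of per-position counts produced by B's pass, prefix made explicit
def cntsFrom (u : List String) : List String → List Int
  | [] => []
  | w :: v => ((u.countP (fun x => decide (x < w)) : Int)) :: cntsFrom (u ++ [w]) v

lemma aIds_nodup (words : List String) : (aIds words).Nodup :=
  (PySem.List.sorted_perm _ _ _).symm.nodup (PySem.Set.nodup_ofList words)

lemma mem_aIds (words : List String) (w : String) : w ∈ aIds words ↔ w ∈ words := by
  rw [aIds, PySem.List.mem_sorted, PySem.Set.mem_ofList]

lemma aMap_items (words : List String) :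
    (aMap words).items
      = (aIds words).zip (PySem.List.pyRange 0 (PySem.List.len (aIds words)) 1) := by
  have hlen : (aIds words).length
      ≤ (PySem.List.pyRange 0 (PySem.List.len (aIds words)) 1).length := by
    simp [PySem.List.length_pyRange_one, PySem.List.len]
  have hfst : (((aIds words).zip
      (PySem.List.pyRange 0 (PySem.List.len (aIds words)) 1)).map Prod.fst).Nodup := by
    rw [List.map_fst_zip hlen]; exact aIds_nodup words
  rw [aMap, PySem.Dict.ofList, PySem.Dict.update]
  rw [PySem.Dict.items_foldl_insert_fresh _ Prod.fst Prod.snd PySem.Dict.empty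
    (fun a _ => PySem.Dict.contains_empty a.1) hfst]
  show PySem.Dict.empty.items ++ _ = _
  rw [show (PySem.Dict.empty : PySem.Dict String Int).items = [] from rfl]
  simp

lemma rnk_eq_idxOf (words : List String) (w : String) (h : w ∈ aIds words) :
    rnk words w = ((aIds words).idxOf w : Int) := by
  have hi : (aIds words).idxOf w < (aIds words).length := List.idxOf_lt_length_of_mem h
  have hip : (aIds words).idxOf w
      < ((aIds words).zip (PySem.List.pyRange 0 (PySem.List.len (aIds words)) 1)).length := by
    simp [List.length_zip, PySem.List.length_pyRange_one, PySem.List.len]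
    omega
  have hmem : (w, ((aIds words).idxOf w : Int)) ∈ (aMap words).items := by
    rw [aMap_items]
    have hzp : ((aIds words).zip
        (PySem.List.pyRange 0 (PySem.List.len (aIds words)) 1))[(aIds words).idxOf w]'hip
        = (w, ((aIds words).idxOf w : Int)) := by
      rw [List.getElem_zip]
      refine Prod.ext ?_ ?_
      · exact List.getElem_idxOf hi
      · simp [PySem.List.pyRange_one, PySem.List.len]
    rw [← hzp]
    exact List.getElem_mem hip
  exact PySem.Dict.getD_of_mem_items _ hmem (by rw [aMap]; exact PySem.Dict.nodup_keys_ofList _) 0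

lemma idxOf_mono (words : List String) {w1 w2 : String}
    (h1 : w1 ∈ aIds words) (h2 : w2 ∈ aIds words) :
    (aIds words).idxOf w1 < (aIds words).idxOf w2 ↔ w1 < w2 := by
  have hp : (aIds words).Pairwise (fun a b => a < b) := by
    rw [aIds]; exact PySem.List.sorted_ofList_pairwise_lt words
  have hpg := List.pairwise_iff_getElem.mp hp
  have hi1 : (aIds words).idxOf w1 < (aIds words).length := List.idxOf_lt_length_of_mem h1
  have hi2 : (aIds words).idxOf w2 < (aIds words).length := List.idxOf_lt_length_of_mem h2
  have e1 : (aIds words)[(aIds words).idxOf w1] = w1 := List.getElem_idxOf hi1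
  have e2 : (aIds words)[(aIds words).idxOf w2] = w2 := List.getElem_idxOf hi2
  constructor
  · intro hlt
    have := hpg _ _ hi1 hi2 hlt
    simpa only [e1, e2] using this
  · intro hlt
    rcases lt_trichotomy ((aIds words).idxOf w1) ((aIds words).idxOf w2) with h | h | h
    · exact h
    · exfalso
      have he := e1
      simp only [h, e2] at he
      exact lt_irrefl _ (he ▸ hlt)
    · exfalso
      have := hpg _ _ hi2 hi1 h
      simp only [e1, e2] at this
      exact lt_irrefl _ (this.trans hlt)

lemma rnk_mono (words : List String) {w1 w2 : String}
    (h1 : w1 ∈ words) (h2 : w2 ∈ words) :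
    rnk words w1 < rnk words w2 ↔ w1 < w2 := by
  have h1' : w1 ∈ aIds words := (mem_aIds words w1).mpr h1
  have h2' : w2 ∈ aIds words := (mem_aIds words w2).mpr h2
  rw [rnk_eq_idxOf words w1 h1', rnk_eq_idxOf words w2 h2']
  rw [Int.ofNat_lt]
  exact idxOf_mono words h1' h2'

lemma aArr_eq (words : List String) :
    aArr words = (List.range words.length).map (fun k => (rnk words (words.getD k ""), k)) := by
  apply List.ext_getElem?
  intro k
  by_cases hk : k < words.length
  · rw [aArr, List.getElem?_map, PySem.List.getElem?_enumerate,
      List.getElem?_eq_getElem hk]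
    rw [List.getElem?_map, List.getElem?_eq_getElem (by simpa using hk)]
    simp [rnk, List.getElem_range, List.getD, List.getElem?_eq_getElem hk]
  · rw [aArr, List.getElem?_map, PySem.List.getElem?_enumerate,
      List.getElem?_eq_none (by omega), List.getElem?_map,
      List.getElem?_eq_none (by simpa using (by omega : words.length ≤ k))]
    rfl

lemma contrib_decomp (u : List (Int × Nat)) (e : Int × Nat) (v : List (Int × Nat)) (j : Nat)
    (hu : ∀ z ∈ u, z.2 ≠ j) (hv : ∀ z ∈ v, z.2 ≠ j) (he : e.2 = j) :
    contrib (u ++ e :: v) j = (smallerCnt u e.1 : Int) := by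
  rw [contrib_append]
  have h1 : contrib u j = 0 := contribA_eq_zero_of_no_idx [] hu
  have h2 : contrib (e :: v) j = 0 := by
    rw [contrib]
    simp only [contribA, smallerCnt, List.countP_nil, List.nil_append]
    rw [contribA_eq, contribA_eq_zero_of_no_idx [] hv, cross_eq_zero_of_no_idx _ hv]
    simp
  have h3 : cross u (e :: v) j = (smallerCnt u e.1 : Int) := by
    simp only [cross, he, cross_eq_zero_of_no_idx u hv]
    simp
  rw [h1, h2, h3]
  ring

lemma contrib_map_range (f : Nat → Int) (n j : Nat) (hj : j < n) :
    contrib ((List.range n).map (fun k => (f k, k))) j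
      = ((List.range j).countP (fun k => decide (f k < f j)) : Int) := by
  have hl : j < ((List.range n).map (fun k => ((f k : Int), k))).length := by simpa using hj
  have hdec : (List.range n).map (fun k => (f k, k))
      = ((List.range n).map (fun k => ((f k : Int), k))).take j
        ++ ((f j, j) : Int × Nat)
          :: ((List.range n).map (fun k => ((f k : Int), k))).drop (j + 1) := by
    conv_lhs => rw [← List.take_append_drop j ((List.range n).map (fun k => (f k, k)))]
    rw [List.drop_eq_getElem_cons hl]
    simp [List.getElem_map, List.getElem_range]
  rw [hdec, contrib_decomp]
  · rw [← List.map_take, List.take_range, min_eq_left (le_of_lt hj)]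
    simp [smallerCnt, List.countP_map, Function.comp_def]
  · intro z hz
    rw [← List.map_take, List.take_range, min_eq_left (le_of_lt hj)] at hz
    obtain ⟨k, hk, rfl⟩ := List.mem_map.mp hz
    have := List.mem_range.mp hk
    omega
  · intro z hz
    obtain ⟨m, hm, hzm⟩ := List.mem_iff_getElem.mp hz
    rw [List.getElem_drop] at hzm
    rw [← hzm]
    rw [List.getElem_map, List.getElem_range]
    omega
  · rfl

lemma take_eq_map_range (words : List String) (j : Nat) (hj : j ≤ words.length) :
    words.take j = (List.range j).map (fun k => words.getD k "") := by
  apply List.ext_getElem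
  · simp [hj]
  · intro i h1 h2
    rw [List.getElem_take, List.getElem_map, List.getElem_range]
    have hi : i < words.length := by simp at h1; omega
    simp [List.getD, List.getElem?_eq_getElem hi]

lemma contrib_aArr (words : List String) (j : Nat) (hj : j < words.length) :
    contrib (aArr words) j = cntI words j := by
  rw [aArr_eq, contrib_map_range _ _ _ hj]
  rw [cntI, take_eq_map_range words j (le_of_lt hj), List.countP_map]
  congr 1
  apply List.countP_congr
  intro k hk
  have hk' : k < words.length := lt_trans (List.mem_range.mp hk) hj
  simp only [Function.comp_def]
  have m1 : words.getD k "" ∈ words := by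
    rw [List.getD, List.getElem?_eq_getElem hk']; exact List.getElem_mem hk'
  have m2 : words.getD j "" ∈ words := by
    rw [List.getD, List.getElem?_eq_getElem hj]; exact List.getElem_mem hj
  simp only [decide_eq_true_eq]
  exact rnk_mono words m1 m2

lemma counts_eq (words : List String) :
    (msortCnt (aArr words) (List.replicate words.length 0)).2
      = (List.range words.length).map (cntI words) := by
  have hb : ∀ e ∈ aArr words, e.2 < (List.replicate words.length (0 : Int)).length := by
    intro e he
    rw [aArr_eq] at he
    obtain ⟨k, hk, rfl⟩ := List.mem_map.mp he
    simpa using List.mem_range.mp hk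
  obtain ⟨_, _, hlen, hcnt⟩ := msortCnt_spec (aArr words) _ hb
  apply List.ext_getElem
  · rw [hlen]; simp
  · intro j h1 h2
    have hj : j < words.length := by rw [hlen] at h1; simpa using h1
    have := hcnt j
    rw [List.getD_eq_getElem _ _ h1] at this
    rw [this, List.getD_replicate _ hj, contrib_aArr words j hj]
    simp [List.getElem_map, List.getElem_range]

lemma cntI_zero (words : List String) : cntI words 0 = 0 := by
  simp [cntI]

lemma B_fold (v u : List String) (b : Int) :
    (v.foldl
      (fun (st : Int × List String) w =>
        (max st.1 ((st.2.countP (fun x => decide (x < w)) : Int)), st.2 ++ [w]))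
      (b, u)).1 = (cntsFrom u v).foldl max b := by
  induction v generalizing u b with
  | nil => rfl
  | cons w v ih => simp only [List.foldl_cons, cntsFrom, ih]

lemma cntsFrom_eq (v u : List String) :
    cntsFrom u v = (List.range v.length).map
      (fun k => (((u ++ v.take k).countP (fun x => decide (x < v.getD k "")) : Int))) := by
  induction v generalizing u with
  | nil => rfl
  | cons w v ih =>
      simp only [cntsFrom, List.length_cons, List.range_succ_eq_map, List.map_cons,
        List.map_map]
      rw [ih (u ++ [w])]
      congr 1
      · simp
      · apply List.map_congr_left
        intro k _
        simp only [Function.comp_def, List.take_succ_cons, List.getD_cons_succ,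
          List.countP_append, List.countP_cons, List.append_assoc, List.countP_nil]
        push_cast
        split_ifs <;> ring

-- ===== VERDICT (by name: the statement is the Claim_ definition above) =====
theorem solution_spec : Claim_equal_solution := by
  unfold Claim_equal_solution
  intro words _
  unfold Spec_solution
  by_cases hn : words.length = 0
  · have hw : words = [] := List.length_eq_zero_iff.mp hn
    subst hw
    rfl
  · rw [solution, if_neg hn, counts_eq, solution_alt]
    have hB := B_fold words [] 0
    rw [hB, cntsFrom_eq]
    simp only [List.nil_append]
    have hfun : (fun k => ((words.take k).countP (fun x => decide (x < words.getD k "")) : Int))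
        = cntI words := by
      funext k; rfl
    rw [hfun]
    obtain ⟨m, hm⟩ := Nat.exists_eq_succ_of_ne_zero hn
    rw [hm, List.range_succ_eq_map, List.map_cons, PySem.List.max?_id_cons]
    simp only [Option.getD_some, List.foldl_cons, cntI_zero, max_self]
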